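-- pv_equiv track=rewrite | github.com/calgagi/competitive_programming | leetcode/917reverseonlyletters/answer1.py | reverseOnlyLetters
-- ===== SOURCE A (Python) =====
-- def reverseOnlyLetters(S):
--     """
--     :type S: str
--     :rtype: str
--     NOTE TO SELF: TRY TO USE A STACK MAYBE?
--     """
--     end = len(S)-1
--     start = 0
--     while start < end:
--         while start < end and not S[start].isalpha():
--             start += 1
--         while start < end and not S[end].isalpha():
--             end -= 1
--         if start < end:
--             Slist = list(S)
--             Slist[start], Slist[end] = Slist[end], Slist[start]
--             S = "".join(Slist)
--             start += 1
--             end -= 1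
--     return S
-- ===== SOURCE B (Python) =====
-- def reverseOnlyLetters(S):
--     letters = [c for c in S if c.isalpha()]
--     it = iter(reversed(letters))
--     return "".join(next(it) if c.isalpha() else c for c in S)
-- ===== Notes on version B (the rewrite author's own statement) =====
-- stated objective: faster
-- what changed: Replaces the two-pointer loop that rebuilds the whole string on every swap with a single pass that collects the letters once and re-emits them in reverse order at the letter positions.
import Mathlib
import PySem

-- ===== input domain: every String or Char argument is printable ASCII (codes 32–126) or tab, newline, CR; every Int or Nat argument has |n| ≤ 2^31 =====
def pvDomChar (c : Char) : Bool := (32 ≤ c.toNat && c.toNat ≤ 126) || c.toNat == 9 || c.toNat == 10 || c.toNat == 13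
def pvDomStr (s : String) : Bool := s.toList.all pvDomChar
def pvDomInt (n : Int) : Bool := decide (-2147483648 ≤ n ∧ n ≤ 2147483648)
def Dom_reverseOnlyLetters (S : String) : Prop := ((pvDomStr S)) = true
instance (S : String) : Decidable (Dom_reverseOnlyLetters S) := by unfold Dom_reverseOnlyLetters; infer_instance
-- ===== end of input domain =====

-- B collects the letters once and re-emits them in reverse in a single pass, instead of
-- A's two-pointer loop that rebuilds the whole string at every swap.

-- ===== PORT A =====
-- inner 'while start < end and not S[start].isalpha(): start += 1'
-- (the index is always in range when the loop body runs, so the 'getD' default is never used)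
def skipStartA (l : List Char) (s e : Int) : Int :=
  if s < e ∧ ¬ PySem.Chars.isalpha ((PySem.List.pyGet? l s).getD 'a') then
    skipStartA l (s + 1) e
  else s
termination_by (e - s).toNat
decreasing_by omega

-- inner 'while start < end and not S[end].isalpha(): end -= 1'
def skipEndA (l : List Char) (s e : Int) : Int :=
  if s < e ∧ ¬ PySem.Chars.isalpha ((PySem.List.pyGet? l e).getD 'a') then
    skipEndA l s (e - 1)
  else e
termination_by (e - s).toNat
decreasing_by omega

-- 'Slist = list(S); Slist[start], Slist[end] = Slist[end], Slist[start]; S = "".join(Slist)'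
-- (both indices are in range whenever the swap is executed, so the fallback is never used)
def swapA (l : List Char) (s e : Int) : List Char :=
  match PySem.List.pyGet? l s, PySem.List.pyGet? l e with
  | some cs, some ce => PySem.List.pySetD (PySem.List.pySetD l s ce) e cs
  | _, _ => l

-- the two lemmas below are cited by loopA's decreasing_by (termination only)
theorem skipStartA_ge (l : List Char) (s e : Int) : s ≤ skipStartA l s e := by
  fun_induction skipStartA l s e <;> omega

theorem skipEndA_le (l : List Char) (s e : Int) : skipEndA l s e ≤ e := by
  fun_induction skipEndA l s e <;> omega

-- outer 'while start < end: …'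
def loopA (l : List Char) (s e : Int) : List Char :=
  if s < e then
    if skipStartA l s e < skipEndA l (skipStartA l s e) e then
      loopA (swapA l (skipStartA l s e) (skipEndA l (skipStartA l s e) e))
        (skipStartA l s e + 1) (skipEndA l (skipStartA l s e) e - 1)
    else l
  else l
termination_by (e - s).toNat
decreasing_by
  have h1 := skipStartA_ge l s e
  have h2 := skipEndA_le l (skipStartA l s e) e
  omega

def reverseOnlyLetters (S : String) : String :=
  String.ofList (loopA S.toList 0 ((S.toList.length : Int) - 1))

-- ===== PORT B =====
-- '"".join(next(it) if c.isalpha() else c for c in S)', with the reversed-letters iterator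
-- as the second argument (the iterator is never exhausted at a letter, so the [] fallback is never used)
def fillB : List Char → List Char → List Char
  | [], _ => []
  | c :: cs, ls =>
    if PySem.Chars.isalpha c then
      match ls with
      | r :: rs => r :: fillB cs rs
      | [] => c :: fillB cs []
    else c :: fillB cs ls

def reverseOnlyLetters_alt (S : String) : String :=
  String.ofList (fillB S.toList ((S.toList.filter PySem.Chars.isalpha).reverse))

-- ===== PRECONDITION & SPEC =====
def Spec_reverseOnlyLetters (S : String) (out : String) : Prop := out = reverseOnlyLetters_alt S
instance (S : String) (out : String) : Decidable (Spec_reverseOnlyLetters S out) := by unfold Spec_reverseOnlyLetters; infer_instance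

-- ===== CLAIM (what is proved, stated in full; the proofs are below) =====
def Claim_equal_reverseOnlyLetters : Prop := ∀ (S : String), Dom_reverseOnlyLetters S → Spec_reverseOnlyLetters S (reverseOnlyLetters S)

-- ===== LEMMAS AND PROOFS =====

theorem loopA_exit (l : List Char) (s e : Int) (h : e ≤ s) : loopA l s e = l := by
  rw [loopA, if_neg (by omega)]

theorem skipStartA_stop (l : List Char) (s e : Int) (a : Char)
    (hg : PySem.List.pyGet? l s = some a) (ha : PySem.Chars.isalpha a = true) :
    skipStartA l s e = s := by
  rw [skipStartA, if_neg]; simp [hg, ha]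

theorem skipEndA_stop (l : List Char) (s e : Int) (b : Char)
    (hg : PySem.List.pyGet? l e = some b) (hb : PySem.Chars.isalpha b = true) :
    skipEndA l s e = e := by
  rw [skipEndA, if_neg]; simp [hg, hb]

-- one outer iteration that only advances 'start' past a non-letter
theorem loopA_step_start (l : List Char) (s e : Int) (c : Char) (h : s < e)
    (hg : PySem.List.pyGet? l s = some c) (hc : PySem.Chars.isalpha c = false) :
    loopA l s e = loopA l (s + 1) e := by
  have hs : skipStartA l s e = skipStartA l (s + 1) e := by
    rw [skipStartA, if_pos ⟨h, by simp [hg, hc]⟩]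
  by_cases h2 : s + 1 < e
  · rw [loopA, if_pos h, hs]
    conv_rhs => rw [loopA, if_pos h2]
  · have he : e = s + 1 := by omega
    have hskip : skipStartA l (s + 1) e = e := by
      rw [he, skipStartA, if_neg (fun hh => absurd hh.1 (lt_irrefl _))]
    have hend : skipEndA l e e = e := by
      rw [skipEndA, if_neg (fun hh => absurd hh.1 (lt_irrefl _))]
    rw [loopA, if_pos h, hs, hskip, hend, if_neg (lt_irrefl e),
        loopA_exit l (s + 1) e (by omega)]

-- one outer iteration that only retreats 'end' past a non-letter (the start char is a letter)
theorem loopA_step_end (l : List Char) (s e : Int) (a b : Char) (h : s < e)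
    (hga : PySem.List.pyGet? l s = some a) (ha : PySem.Chars.isalpha a = true)
    (hgb : PySem.List.pyGet? l e = some b) (hb : PySem.Chars.isalpha b = false) :
    loopA l s e = loopA l s (e - 1) := by
  have he1 : skipEndA l s e = skipEndA l s (e - 1) := by
    rw [skipEndA, if_pos ⟨h, by simp [hgb, hb]⟩]
  by_cases h2 : s < e - 1
  · rw [loopA, if_pos h, skipStartA_stop l s e a hga ha, he1]
    conv_rhs => rw [loopA, if_pos h2, skipStartA_stop l s (e - 1) a hga ha]
  · have hskip : skipEndA l s (e - 1) = e - 1 := by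
      rw [skipEndA, if_neg (fun hh => absurd hh.1 (by omega))]
    rw [loopA, if_pos h, skipStartA_stop l s e a hga ha, he1, hskip,
        if_neg (by omega), loopA_exit l s (e - 1) (by omega)]

theorem set_at_length {α : Type} (xs zs : List α) (y c : α) :
    (xs ++ y :: zs).set xs.length c = xs ++ c :: zs := by
  induction xs with
  | nil => simp
  | cons x xs ih => simp [ih]

theorem swapA_spec (pre m suf : List Char) (a b : Char) :
    swapA (pre ++ a :: (m ++ b :: suf)) (pre.length : Int)
      ((pre.length : Int) + (m.length : Int) + 1) = pre ++ b :: (m ++ a :: suf) := by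
  have hcast : ((pre.length : Int) + (m.length : Int) + 1) = (((pre ++ a :: m).length : Nat) : Int) := by
    simp; omega
  have hga : PySem.List.pyGet? (pre ++ a :: (m ++ b :: suf)) (pre.length : Int) = some a :=
    PySem.List.pyGet?_append_length pre (m ++ b :: suf) a
  have hgb : PySem.List.pyGet? (pre ++ a :: (m ++ b :: suf)) ((pre.length : Int) + (m.length : Int) + 1) = some b := by
    rw [hcast, show pre ++ a :: (m ++ b :: suf) = (pre ++ a :: m) ++ b :: suf by simp]
    exact PySem.List.pyGet?_append_length (pre ++ a :: m) suf b
  rw [swapA, hga, hgb]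
  dsimp only
  rw [hcast, PySem.List.pySetD_natCast, PySem.List.pySetD_natCast]
  rw [set_at_length pre (m ++ b :: suf) a b]
  rw [show (pre ++ a :: m).length = (pre ++ b :: m).length by simp]
  rw [show pre ++ b :: (m ++ b :: suf) = (pre ++ b :: m) ++ b :: suf by simp]
  rw [set_at_length (pre ++ b :: m) suf b a]
  simp

-- fillB pushes a trailing non-letter straight through
theorem fillB_append_nonalpha (xs : List Char) (b : Char) (hb : PySem.Chars.isalpha b = false) :
    ∀ ls, fillB (xs ++ [b]) ls = fillB xs ls ++ [b] := by
  induction xs with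
  | nil => intro ls; simp [fillB, hb]
  | cons c cs ih =>
    intro ls
    by_cases hc : PySem.Chars.isalpha c
    · cases ls with
      | nil => simp [fillB, hc, ih]
      | cons r rs => simp [fillB, hc, ih]
    · simp [fillB, hc, ih]

-- a trailing letter consumes exactly the last stacked letter when the stack size matches
theorem fillB_append_alpha (y z : Char) (hy : PySem.Chars.isalpha y = true) :
    ∀ (xs ls : List Char), ls.length = (xs.filter PySem.Chars.isalpha).length →
    fillB (xs ++ [y]) (ls ++ [z]) = fillB xs ls ++ [z] := by
  intro xs
  induction xs with
  | nil =>
    intro ls hlen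
    have : ls = [] := List.length_eq_zero_iff.mp (by simpa using hlen)
    subst this; simp [fillB, hy]
  | cons c cs ih =>
    intro ls hlen
    by_cases hc : PySem.Chars.isalpha c
    · cases ls with
      | nil => simp [hc] at hlen
      | cons r rs =>
        simp only [List.filter_cons, hc, if_pos, List.length_cons] at hlen
        simp only [List.cons_append, fillB, hc, if_pos]
        rw [ih rs (by omega)]
    · have hc' : PySem.Chars.isalpha c = false := by simpa using hc
      simp only [List.filter_cons, hc', Bool.false_eq_true, if_false] at hlen
      simp [fillB, hc', ih ls hlen]

-- the heart of the proof: A's two-pointer loop on the region 'mid' equals B's stack fill of 'mid'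
theorem loopA_eq_fillB : ∀ (n : Nat) (mid pre suf : List Char), mid.length ≤ n →
    loopA (pre ++ mid ++ suf) (pre.length : Int) ((pre.length : Int) + (mid.length : Int) - 1)
      = pre ++ fillB mid ((mid.filter PySem.Chars.isalpha).reverse) ++ suf := by
  intro n
  induction n with
  | zero =>
    intro mid pre suf h
    have : mid = [] := List.length_eq_zero_iff.mp (by omega)
    subst this
    rw [loopA_exit _ _ _ (by simp)]
    simp [fillB]
  | succ n ih =>
    intro mid pre suf hlen
    match mid with
    | [] =>
      rw [loopA_exit _ _ _ (by simp)]
      simp [fillB]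
    | [c] =>
      rw [loopA_exit _ _ _ (by simp)]
      by_cases hc : PySem.Chars.isalpha c <;> simp [fillB, hc]
    | a :: c0 :: rest0 =>
      obtain hnil | ⟨m, b, hmb⟩ := (c0 :: rest0).eq_nil_or_concat
      · simp at hnil
      rw [List.concat_eq_append] at hmb
      rw [hmb] at hlen ⊢
      have hga : PySem.List.pyGet? (pre ++ (a :: (m ++ [b])) ++ suf) (pre.length : Int) = some a := by
        rw [show pre ++ (a :: (m ++ [b])) ++ suf = pre ++ a :: (m ++ b :: suf) by simp]
        exact PySem.List.pyGet?_append_length pre (m ++ b :: suf) a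
      have hElen : ((pre.length : Int) + ((a :: (m ++ [b])).length : Int) - 1)
          = (pre.length : Int) + (m.length : Int) + 1 := by simp; omega
      have hgb : PySem.List.pyGet? (pre ++ (a :: (m ++ [b])) ++ suf)
          ((pre.length : Int) + ((a :: (m ++ [b])).length : Int) - 1) = some b := by
        rw [hElen, show (pre.length : Int) + (m.length : Int) + 1 = (((pre ++ a :: m).length : Nat) : Int) by simp; omega]
        rw [show pre ++ (a :: (m ++ [b])) ++ suf = (pre ++ a :: m) ++ b :: suf by simp]
        exact PySem.List.pyGet?_append_length (pre ++ a :: m) suf b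
      have hslt : (pre.length : Int) < (pre.length : Int) + ((a :: (m ++ [b])).length : Int) - 1 := by
        simp; omega
      by_cases ha : PySem.Chars.isalpha a
      · by_cases hb : PySem.Chars.isalpha b
        · -- both ends are letters: one swap, then recurse on the middle
          rw [loopA, if_pos hslt, skipStartA_stop _ _ _ a hga ha,
              skipEndA_stop _ _ _ b hgb hb, if_pos hslt, hElen]
          rw [show pre ++ (a :: (m ++ [b])) ++ suf = pre ++ a :: (m ++ b :: suf) by simp]
          rw [swapA_spec pre m suf a b]
          have h1 : ((pre.length : Int) + 1) = (((pre ++ [b]).length : Nat) : Int) := by simp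
          have h2 : ((pre.length : Int) + (m.length : Int) + 1 - 1)
              = ((((pre ++ [b]).length : Nat) : Int) + ((m.length : Nat) : Int) - 1) := by simp; omega
          rw [show pre ++ b :: (m ++ a :: suf) = (pre ++ [b]) ++ m ++ (a :: suf) by simp]
          rw [h1, h2, ih m (pre ++ [b]) (a :: suf) (by simp at hlen ⊢; omega)]
          have hfil : ((a :: (m ++ [b])).filter PySem.Chars.isalpha).reverse
              = b :: ((m.filter PySem.Chars.isalpha).reverse ++ [a]) := by
            simp [List.filter_append, ha, hb]
          rw [hfil]
          have hfb : fillB (a :: (m ++ [b])) (b :: ((m.filter PySem.Chars.isalpha).reverse ++ [a]))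
              = b :: (fillB m ((m.filter PySem.Chars.isalpha).reverse) ++ [a]) := by
            simp only [fillB, ha, if_pos]
            rw [fillB_append_alpha b a hb m _ (by simp)]
          rw [hfb]
          simp
        · -- the end char is not a letter: it stays, recurse on everything before it
          have hb' : PySem.Chars.isalpha b = false := by simpa using hb
          rw [loopA_step_end _ _ _ a b hslt hga ha hgb hb']
          have h2 : ((pre.length : Int) + ((a :: (m ++ [b])).length : Int) - 1 - 1)
              = ((pre.length : Int) + ((((a :: m).length : Nat)) : Int) - 1) := by simp; omega
          rw [h2, show pre ++ (a :: (m ++ [b])) ++ suf = pre ++ (a :: m) ++ (b :: suf) by simp]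
          rw [ih (a :: m) pre (b :: suf) (by simp at hlen ⊢; omega)]
          have hfil : ((a :: (m ++ [b])).filter PySem.Chars.isalpha)
              = ((a :: m).filter PySem.Chars.isalpha) := by
            simp [List.filter_cons, List.filter_append, hb']
          rw [hfil, show a :: (m ++ [b]) = (a :: m) ++ [b] by simp,
              fillB_append_nonalpha (a :: m) b hb']
          simp
      · -- the start char is not a letter: it stays, recurse on everything after it
        have ha' : PySem.Chars.isalpha a = false := by simpa using ha
        rw [loopA_step_start _ _ _ a hslt hga ha']
        have h1 : ((pre.length : Int) + 1) = (((pre ++ [a]).length : Nat) : Int) := by simp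
        have h2 : ((pre.length : Int) + ((a :: (m ++ [b])).length : Int) - 1)
            = ((((pre ++ [a]).length : Nat) : Int) + (((m ++ [b]).length : Nat) : Int) - 1) := by
          simp; omega
        rw [h1, h2, show pre ++ (a :: (m ++ [b])) ++ suf = (pre ++ [a]) ++ (m ++ [b]) ++ suf by simp]
        rw [ih (m ++ [b]) (pre ++ [a]) suf (by simp at hlen ⊢; omega)]
        have hfil : ((a :: (m ++ [b])).filter PySem.Chars.isalpha)
            = ((m ++ [b]).filter PySem.Chars.isalpha) := by
          simp [List.filter_cons, ha']
        have hfb : fillB (a :: (m ++ [b])) (((m ++ [b]).filter PySem.Chars.isalpha).reverse)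
            = a :: fillB (m ++ [b]) (((m ++ [b]).filter PySem.Chars.isalpha).reverse) := by
          simp [fillB, ha']
        rw [hfil, hfb]
        simp

theorem ports_agree (S : String) : reverseOnlyLetters S = reverseOnlyLetters_alt S := by
  unfold reverseOnlyLetters reverseOnlyLetters_alt
  have h := loopA_eq_fillB S.toList.length S.toList [] [] (le_refl _)
  simp only [List.nil_append, List.append_nil, List.length_nil, Nat.cast_zero, zero_add] at h
  rw [h]

-- ===== VERDICT (by name: the statement is the Claim_ definition above) =====
theorem reverseOnlyLetters_spec : Claim_equal_reverseOnlyLetters := by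
  intro S _
  unfold Spec_reverseOnlyLetters
  exact ports_agree S
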